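-- pv_equiv track=rewrite | github.com/amanefjt/p2workflowy | archive/book_mode/src/skills.py | _split_by_heading_level
-- ===== SOURCE A (Python) =====
-- from typing import List, Dict, Any, cast, Optional
--
-- def _split_by_heading_level(text: str, level: int) -> List[str]:
--     """指定されたレベルのMarkdown見出しで分割する"""
--     marker = "#" * level + " "
--     lines = text.split('\n')
--     chunks = []
--     current_chunk = []
--
--     for line in lines:
--         if line.startswith(marker):
--             if current_chunk:
--                 chunks.append("\n".join(current_chunk))
--             current_chunk = [line]
--         else:
--             current_chunk.append(line)
--
--     if current_chunk:
--         chunks.append("\n".join(current_chunk))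
--     return chunks
-- ===== SOURCE B (Python) =====
-- from typing import List
--
-- def _split_by_heading_level(text: str, level: int) -> List[str]:
--     """Split markdown text at headings of the given level (two-index scan over boundaries)."""
--     marker = "#" * level + " "
--     lines = text.split('\n')
--     chunks = []
--     i = 0
--     n = len(lines)
--     while i < n:
--         j = i + 1
--         while j < n and not lines[j].startswith(marker):
--             j += 1
--         chunks.append("\n".join(lines[i:j]))
--         i = j
--     return chunks
-- ===== Notes on version B (the rewrite author's own statement) =====
-- stated objective: alternative
-- what changed: A builds chunks with a flush-on-heading accumulator loop; B instead uses a two-index scan: for each chunk start it advances a second index past non-heading lines and emits the slice lines[i:j] directly, with no current-chunk buffer or flush logic.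
import Mathlib
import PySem

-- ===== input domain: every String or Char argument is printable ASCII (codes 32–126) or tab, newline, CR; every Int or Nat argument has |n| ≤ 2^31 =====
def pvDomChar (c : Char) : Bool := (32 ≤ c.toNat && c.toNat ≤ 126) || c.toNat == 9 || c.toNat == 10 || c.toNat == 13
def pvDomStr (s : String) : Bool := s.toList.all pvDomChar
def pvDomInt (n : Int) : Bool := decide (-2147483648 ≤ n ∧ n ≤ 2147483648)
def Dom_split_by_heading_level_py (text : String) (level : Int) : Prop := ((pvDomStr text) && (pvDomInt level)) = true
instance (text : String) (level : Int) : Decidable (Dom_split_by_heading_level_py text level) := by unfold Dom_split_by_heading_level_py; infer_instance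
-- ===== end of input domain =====

-- B replaces A's accumulator loop by a two-index scan that slices out one whole chunk per step (objective: alternative decomposition, same cost); return values only, no mutation involved.

-- ===== PORT A =====
-- A's loop body ('if line.startswith(marker): flush; current=[line] else: current.append(line)')
def pvStepA (marker : String) (st : List String × List String) (line : String) :
    List String × List String :=
  if PySem.Str.startswith line marker then
    ((if st.2.isEmpty then st.1 else st.1 ++ [PySem.Str.join "\n" st.2]), [line])
  else
    (st.1, st.2 ++ [line])

-- A's 'if current_chunk: chunks.append("\n".join(current_chunk))' (appears twice in A)
def pvFlushA (st : List String × List String) : List String :=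
  if st.2.isEmpty then st.1 else st.1 ++ [PySem.Str.join "\n" st.2]

def split_by_heading_level_py (text : String) (level : Int) : List String :=
  -- '"#" * level + " "' : string repetition (empty for level ≤ 0), exact via List.pyRepeat on chars
  let marker : String := String.ofList (PySem.List.pyRepeat ['#'] level ++ [' '])
  -- sep "\n" is nonempty, so split? never returns none; getD only strips the Option
  let lines := (PySem.Str.split? text "\n").getD []
  pvFlushA (lines.foldl (pvStepA marker) ([], []))

-- ===== PORT B =====
-- Source B's outer while-loop: each step takes one chunk (lines[i:j], where the inner
-- while advances j past non-heading lines) and continues at i = j.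
def pvChunksB (marker : String) : List String → List String
  | [] => []
  | l :: ls =>
      PySem.Str.join "\n" (l :: ls.takeWhile (fun x => !(PySem.Str.startswith x marker)))
        :: pvChunksB marker (ls.dropWhile (fun x => !(PySem.Str.startswith x marker)))
termination_by ls => ls.length
decreasing_by
  exact Nat.lt_succ_of_le (List.length_dropWhile_le _ _)

def split_by_heading_level_py_alt (text : String) (level : Int) : List String :=
  let marker : String := String.ofList (PySem.List.pyRepeat ['#'] level ++ [' '])
  pvChunksB marker ((PySem.Str.split? text "\n").getD [])

-- ===== PRECONDITION & SPEC =====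
def Spec_split_by_heading_level_py (text : String) (level : Int) (out : List String) : Prop := out = split_by_heading_level_py_alt text level
instance (text : String) (level : Int) (out : List String) : Decidable (Spec_split_by_heading_level_py text level out) := by unfold Spec_split_by_heading_level_py; infer_instance

-- ===== CLAIM (what is proved, stated in full; the proofs are below) =====
def Claim_equal_split_by_heading_level_py : Prop := ∀ (text : String) (level : Int), Dom_split_by_heading_level_py text level → Spec_split_by_heading_level_py text level (split_by_heading_level_py text level)

-- ===== LEMMAS AND PROOFS =====

-- Invariant of A's fold: with a nonempty current chunk, finishing the fold yields the
-- already-emitted chunks, then the current chunk extended to the next heading, then B's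
-- chunks of the remaining lines.
lemma pv_fold_eq (marker : String) (ls : List String) :
    ∀ (chunks cur : List String), cur ≠ [] →
      pvFlushA (ls.foldl (pvStepA marker) (chunks, cur)) =
        chunks ++ PySem.Str.join "\n"
            (cur ++ ls.takeWhile (fun x => !(PySem.Str.startswith x marker)))
          :: pvChunksB marker (ls.dropWhile (fun x => !(PySem.Str.startswith x marker))) := by
  induction ls with
  | nil =>
      intro chunks cur hcur
      simp [pvFlushA, pvChunksB, List.isEmpty_iff, hcur]
  | cons l ls ih =>
      intro chunks cur hcur
      have hce : cur.isEmpty = false := by simp [hcur]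
      rw [List.foldl_cons]
      by_cases hl : PySem.Str.startswith l marker
      · have hl' : PySem.Chars.startswith l.toList marker.toList = true := by simpa using hl
        rw [show pvStepA marker (chunks, cur) l
              = (chunks ++ [PySem.Str.join "\n" cur], [l]) by simp [pvStepA, hl', hce]]
        rw [ih _ [l] (by simp)]
        simp [pvChunksB, hl']
      · have hl' : PySem.Chars.startswith l.toList marker.toList = false := by simpa using hl
        rw [show pvStepA marker (chunks, cur) l = (chunks, cur ++ [l]) by simp [pvStepA, hl']]
        rw [ih _ (cur ++ [l]) (by simp)]
        simp [hl']

lemma pv_first_step (marker l : String) :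
    pvStepA marker ([], []) l = ([], [l]) := by
  unfold pvStepA
  split <;> simp

-- ===== VERDICT (by name: the statement is the Claim_ definition above) =====
theorem split_by_heading_level_py_spec : Claim_equal_split_by_heading_level_py := by
  intro text level _
  unfold Spec_split_by_heading_level_py
  simp only [split_by_heading_level_py, split_by_heading_level_py_alt]
  generalize (PySem.Str.split? text "\n").getD [] = lines
  cases lines with
  | nil => simp [pvFlushA, pvChunksB]
  | cons l ls =>
      rw [List.foldl_cons, pv_first_step]
      rw [pv_fold_eq _ _ _ [l] (by simp)]
      simp [pvChunksB]
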